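-- pv_equiv track=rewrite | github.com/dataKim1201/coding_test | BOJ/12851.py | bfs
-- ===== SOURCE A (Python) =====
-- from collections import deque
--
-- def bfs(n,k):
--     queue = deque()
--     queue.append(n)
--     count = [-1] * 100001
--     dist = [-1] * 100001
--     dist[n] = 0
--     count[n] = 1
--     while queue:
--         crnt = queue.popleft()
--         for nx in [crnt + 1, crnt -1, crnt *2]:
--             if nx < 0 or nx > 100000: continue
--             if dist[nx] == -1:
--                 dist[nx] = dist[crnt] + 1
--                 count[nx] = count[crnt]
--                 queue.append(nx)
--             else: # 방문한 적이 있는 경우라면 -> count min처리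
--                 if dist[nx] == dist[crnt] + 1:
--                     count[nx] += count[crnt]
--                 # crnt 가 더 크면?
--                 # if dist[nx] < dist[crnt] + 1: continue
--                 # if dist[nx] > dist[crnt] + 1:
--                 #     count[nx] = 1
--                 #     dist[nx] = dist[crnt] + 1
--     return dist[k], count[k]
-- ===== SOURCE B (Python) =====
-- def bfs(n, k):
--     # Phase 1: plain BFS from n computing only shortest distances.
--     dist = [-1] * 100001
--     dist[n] = 0
--     order = [n]
--     head = 0
--     while head < len(order):
--         u = order[head]
--         head += 1
--         du1 = dist[u] + 1
--         for v in (u + 1, u - 1, u * 2):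
--             if 0 <= v <= 100000 and dist[v] == -1:
--                 dist[v] = du1
--                 order.append(v)
--     # Phase 2: a separate pass in nondecreasing-distance order (the BFS order)
--     # propagating path counts along edges that advance the distance by one.
--     count = [-1] * 100001
--     count[n] = 1
--     for u in order:
--         du1 = dist[u] + 1
--         cu = count[u]
--         for v in (u + 1, u - 1, u * 2):
--             if 0 <= v <= 100000 and dist[v] == du1:
--                 count[v] = cu if count[v] == -1 else count[v] + cu
--     return dist[k], count[k]
-- ===== Notes on version B (the rewrite author's own statement) =====
-- stated objective: alternative
-- what changed: Splits A's single interleaved BFS (which maintains dist and path counts together in one deque loop with three branches) into two independent staged passes: a plain BFS that computes only distances and the processing order, then a separate distance-ordered propagation pass that computes path counts from the finished distance table.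
import Mathlib
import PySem

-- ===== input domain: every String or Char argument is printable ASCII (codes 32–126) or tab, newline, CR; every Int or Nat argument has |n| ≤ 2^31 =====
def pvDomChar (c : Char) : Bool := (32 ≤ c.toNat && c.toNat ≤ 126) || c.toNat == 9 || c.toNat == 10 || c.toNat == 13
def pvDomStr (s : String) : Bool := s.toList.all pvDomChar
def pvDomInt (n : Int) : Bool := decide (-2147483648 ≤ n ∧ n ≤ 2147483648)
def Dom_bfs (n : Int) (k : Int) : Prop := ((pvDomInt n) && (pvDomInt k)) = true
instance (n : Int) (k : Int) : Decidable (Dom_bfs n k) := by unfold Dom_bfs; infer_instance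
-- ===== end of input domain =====

-- B replaces A's single interleaved BFS (dist and path counts maintained together in one
-- deque loop) by two staged passes: a plain BFS computing only distances and the visiting
-- order, then a separate distance-ordered pass computing the path counts (objective:
-- alternative decomposition, same cost); equivalence is about the return value on the
-- inputs where the Python A returns (Pre_bfs below).

-- ===== PORT A =====
-- Python list indexing l[i] on a length-100001 list: a negative -100001 ≤ i < 0 wraps to
-- i + 100001 (exact on Pre_bfs; out-of-range indices raise in Python and are excluded by Pre_bfs).
def pyIdx (i : Int) : Nat := if i < 0 then (i + 100001).toNat else i.toNat

-- one iteration of A's inner `for nx in [crnt+1, crnt-1, crnt*2]` body over state (queue, dist, count);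
-- the deque (append right / popleft) is modelled by an ever-growing array plus a read cursor in bfsLoop.
def bfsVisit (crnt : Int) (s : Array Int × Array Int × Array Int) (nx : Int) :
    Array Int × Array Int × Array Int :=
  let (q, d, c) := s
  if nx < 0 ∨ nx > 100000 then (q, d, c)
  else if d.getD nx.toNat 0 = -1 then
    (q.push nx, d.setIfInBounds nx.toNat (d.getD (pyIdx crnt) 0 + 1),
      c.setIfInBounds nx.toNat (c.getD (pyIdx crnt) 0))
  else if d.getD nx.toNat 0 = d.getD (pyIdx crnt) 0 + 1 then
    (q, d, c.setIfInBounds nx.toNat (c.getD nx.toNat 0 + c.getD (pyIdx crnt) 0))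
  else (q, d, c)

-- A's `while queue:` loop; fuel 200004 exceeds the 100002 possible enqueues (guard making it total)
def bfsLoop : Nat → Array Int → Nat → Array Int → Array Int → Array Int × Array Int
  | 0, _, _, d, c => (d, c)
  | fuel+1, q, qi, d, c =>
    if h : qi < q.size then
      let s := [q[qi] + 1, q[qi] - 1, q[qi] * 2].foldl (bfsVisit q[qi]) (q, d, c)
      bfsLoop fuel s.1 (qi+1) s.2.1 s.2.2
    else (d, c)

def bfs (n : Int) (k : Int) : Int × Int :=
  let dist := (Array.replicate 100001 (-1 : Int)).setIfInBounds (pyIdx n) 0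
  let count := (Array.replicate 100001 (-1 : Int)).setIfInBounds (pyIdx n) 1
  let r := bfsLoop 200004 #[n] 0 dist count
  (r.1.getD (pyIdx k) 0, r.2.getD (pyIdx k) 0)

-- ===== PORT B =====
-- phase 1, one target of B's discovery loop: `if 0 <= v <= 100000 and dist[v] == -1` (du1 cached)
def altP1Visit (du1 : Int) (s : Array Int × Array Int) (v : Int) : Array Int × Array Int :=
  let (ord, d) := s
  if 0 ≤ v ∧ v ≤ 100000 ∧ d.getD v.toNat 0 = -1 then
    (ord.push v, d.setIfInBounds v.toNat du1)
  else (ord, d)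

-- B's `while head < len(order):` loop over (order, head, dist); fuel as in A's port
def altP1Loop : Nat → Array Int → Nat → Array Int → Array Int × Array Int
  | 0, ord, _, d => (ord, d)
  | fuel+1, ord, head, d =>
    if h : head < ord.size then
      let s := [ord[head] + 1, ord[head] - 1, ord[head] * 2].foldl
        (altP1Visit (d.getD (pyIdx ord[head]) 0 + 1)) (ord, d)
      altP1Loop fuel s.1 (head+1) s.2
    else (ord, d)

-- phase 2, one target of B's counting loop: `if 0 <= v <= 100000 and dist[v] == du1`
def altP2Visit (du1 : Int) (cu : Int) (dF : Array Int) (c : Array Int) (v : Int) : Array Int :=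
  if 0 ≤ v ∧ v ≤ 100000 ∧ dF.getD v.toNat 0 = du1 then
    c.setIfInBounds v.toNat (if c.getD v.toNat 0 = -1 then cu else c.getD v.toNat 0 + cu)
  else c

-- phase 2, B's `for u in order:` body (du1 and cu cached at the top of the body)
def altP2Step (dF : Array Int) (c : Array Int) (u : Int) : Array Int :=
  [u + 1, u - 1, u * 2].foldl (altP2Visit (dF.getD (pyIdx u) 0 + 1) (c.getD (pyIdx u) 0) dF) c

def bfs_alt (n : Int) (k : Int) : Int × Int :=
  let dist0 := (Array.replicate 100001 (-1 : Int)).setIfInBounds (pyIdx n) 0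
  let p1 := altP1Loop 200004 #[n] 0 dist0
  let count0 := (Array.replicate 100001 (-1 : Int)).setIfInBounds (pyIdx n) 1
  let cF := p1.1.foldl (altP2Step p1.2) count0
  (p1.2.getD (pyIdx k) 0, cF.getD (pyIdx k) 0)

-- ===== PRECONDITION & SPEC =====
-- Pre_bfs is exactly the set of inputs on which the Python A returns: outside the box
-- -100001 ≤ n,k ≤ 100000 the list accesses dist[n] / dist[k] raise IndexError.
def Pre_bfs (n : Int) (k : Int) : Prop :=
  -100001 ≤ n ∧ n ≤ 100000 ∧ -100001 ≤ k ∧ k ≤ 100000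
instance (n : Int) (k : Int) : Decidable (Pre_bfs n k) := by unfold Pre_bfs; infer_instance
def pvWitness_bfs : Int × Int := (5, 17)

def Spec_bfs (n : Int) (k : Int) (out : Int × Int) : Prop := out = bfs_alt n k
instance (n : Int) (k : Int) (out : Int × Int) : Decidable (Spec_bfs n k out) := by unfold Spec_bfs; infer_instance

-- ===== CLAIM (what is proved, stated in full; the proofs are below) =====
def Claim_equal_bfs : Prop := ∀ (n : Int) (k : Int), Dom_bfs n k → Pre_bfs n k → Spec_bfs n k (bfs n k)

-- ===== LEMMAS AND PROOFS =====

-- ghost phase-1 step over (dist, list of newly discovered nodes)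
def g1Visit (du1 : Int) (s : Array Int × List Int) (v : Int) : Array Int × List Int :=
  let (d, new) := s
  if 0 ≤ v ∧ v ≤ 100000 ∧ d.getD v.toNat 0 = -1 then
    (d.setIfInBounds v.toNat du1, new ++ [v])
  else (d, new)

def step1 (u : Int) (d : Array Int) : Array Int × List Int :=
  [u + 1, u - 1, u * 2].foldl (g1Visit (d.getD (pyIdx u) 0 + 1)) (d, [])

-- ghost phase-1 loop over a list queue; returns (final dist, processed order)
def ghost1 : Nat → List Int → Array Int → Array Int × List Int
  | 0, _, d => (d, [])
  | _+1, [], d => (d, [])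
  | f+1, u :: rest, d =>
    let s := step1 u d
    let r := ghost1 f (rest ++ s.2) s.1
    (r.1, u :: r.2)

-- ghost A step over (dist, count, new list), mirroring bfsVisit with a list queue
def gAVisit (u : Int) (s : Array Int × Array Int × List Int) (v : Int) :
    Array Int × Array Int × List Int :=
  let (d, c, new) := s
  if v < 0 ∨ v > 100000 then (d, c, new)
  else if d.getD v.toNat 0 = -1 then
    (d.setIfInBounds v.toNat (d.getD (pyIdx u) 0 + 1),
      c.setIfInBounds v.toNat (c.getD (pyIdx u) 0), new ++ [v])
  else if d.getD v.toNat 0 = d.getD (pyIdx u) 0 + 1 then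
    (d, c.setIfInBounds v.toNat (c.getD v.toNat 0 + c.getD (pyIdx u) 0), new)
  else (d, c, new)

def ghostA : Nat → List Int → Array Int → Array Int → Array Int × Array Int
  | 0, _, d, c => (d, c)
  | _+1, [], d, c => (d, c)
  | f+1, u :: rest, d, c =>
    let s := [u + 1, u - 1, u * 2].foldl (gAVisit u) (d, c, [])
    ghostA f (rest ++ s.2.2) s.1 s.2.1

-- invariants
def invA (d : Array Int) : Prop := ∀ x ∈ d.toList, -1 ≤ x
def Inv2 (d c : Array Int) : Prop :=
  ∀ i : Nat, i ≤ 100000 →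
    (d.getD i 0 = -1 ∧ c.getD i 0 = -1) ∨ (d.getD i 0 ≠ -1 ∧ 1 ≤ c.getD i 0)
def PendOK (pend : List Int) (d : Array Int) : Prop :=
  ∀ u ∈ pend, -100001 ≤ u ∧ u ≤ 100000 ∧ d.getD (pyIdx u) 0 ≠ -1
def phi (d : Array Int) : Nat := d.toList.countP (· = -1)

-- small Array facts
lemma getD_set_ne (a : Array Int) (i j : Nat) (v : Int) (h : i ≠ j) :
    (a.setIfInBounds i v).getD j 0 = a.getD j 0 := by
  simp [Array.getD_eq_getD_getElem?, h]

lemma getD_neg_lt (a : Array Int) (i : Nat) (h : a.getD i 0 = -1) : i < a.size := by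
  by_contra hn
  simp [Array.getD_eq_getD_getElem?, Array.getElem?_eq_none (by omega : a.size ≤ i)] at h

lemma getD_set_self (a : Array Int) (i : Nat) (v : Int) (h : i < a.size) :
    (a.setIfInBounds i v).getD i 0 = v := by
  simp [Array.getD_eq_getD_getElem?, Array.getElem?_setIfInBounds, h]

lemma invA_getD (d : Array Int) (i : Nat) (h : invA d) : -1 ≤ d.getD i 0 := by
  by_cases hi : i < d.size
  · rw [Array.getD_eq_getD_getElem?, Array.getElem?_eq_getElem hi]
    exact h _ (Array.getElem_mem_toList hi)
  · rw [Array.getD_eq_getD_getElem?, Array.getElem?_eq_none (by omega)]; norm_num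

lemma invA_set (d : Array Int) (i : Nat) (v : Int) (h : invA d) (hv : -1 ≤ v) :
    invA (d.setIfInBounds i v) := by
  intro x hx
  rw [Array.toList_setIfInBounds] at hx
  rcases List.mem_or_eq_of_mem_set hx with hx' | rfl
  · exact h _ hx'
  · exact hv

lemma phi_set_neg (d : Array Int) (i : Nat) (v : Int) (h : d.getD i 0 = -1) (hv : v ≠ -1) :
    phi (d.setIfInBounds i v) + 1 = phi d := by
  have hi : i < d.size := getD_neg_lt _ _ h
  have hi' : i < d.toList.length := by simpa using hi
  have hget : d.toList[i] = -1 := by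
    rw [Array.getD_eq_getD_getElem?, Array.getElem?_eq_getElem hi] at h
    simpa using h
  have hpos : 0 < d.toList.countP (· = -1) :=
    List.countP_pos_iff.mpr ⟨_, List.getElem_mem hi', by simp [hget]⟩
  have hvf : (decide (v = -1)) = false := by simp [hv]
  unfold phi
  rw [Array.toList_setIfInBounds, List.countP_set hi']
  simp only [hget, hvf, decide_true, if_true, if_false, Bool.false_eq_true]
  omega

lemma pushAll_toList (l : List Int) (q : Array Int) :
    (l.foldl Array.push q).toList = q.toList ++ l := by
  induction l generalizing q with
  | nil => simp
  | cons x t ih =>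
    simp only [List.foldl_cons]
    rw [ih, Array.toList_push]
    simp

-- g1Visit-fold facts: accumulator, monotonicity, phi, invA, membership of the new list
lemma g1fold_acc (l : List Int) (du1 : Int) (acc : List Int) (d : Array Int) :
    l.foldl (g1Visit du1) (d, acc)
      = ((l.foldl (g1Visit du1) (d, [])).1, acc ++ (l.foldl (g1Visit du1) (d, [])).2) := by
  induction l generalizing d acc with
  | nil => simp
  | cons v t ih =>
    simp only [List.foldl_cons, g1Visit]
    split_ifs with h1
    · simp only [List.nil_append]
      rw [ih (acc := acc ++ [v]), ih (acc := [v])]; simp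
    · exact ih (acc := acc) d

lemma g1fold_mono (l : List Int) (du1 : Int) (d : Array Int) (i : Nat)
    (h : d.getD i 0 ≠ -1) :
    (l.foldl (g1Visit du1) (d, [])).1.getD i 0 = d.getD i 0 := by
  induction l generalizing d with
  | nil => simp
  | cons v t ih =>
    simp only [List.foldl_cons, g1Visit]
    split_ifs with h1
    · rw [g1fold_acc]
      have hne : v.toNat ≠ i := by
        intro he; rw [← he] at h; exact h h1.2.2
      have := ih (d.setIfInBounds v.toNat du1) (by rwa [getD_set_ne _ _ _ _ hne])
      rw [this, getD_set_ne _ _ _ _ hne]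
    · exact ih d h

lemma g1fold_phi (l : List Int) (du1 : Int) (d : Array Int) (hdu : du1 ≠ -1) :
    phi (l.foldl (g1Visit du1) (d, [])).1 + (l.foldl (g1Visit du1) (d, [])).2.length = phi d := by
  induction l generalizing d with
  | nil => simp
  | cons v t ih =>
    simp only [List.foldl_cons, g1Visit]
    split_ifs with h1
    · rw [g1fold_acc]
      have := ih (d.setIfInBounds v.toNat du1)
      have hphi := phi_set_neg d v.toNat du1 h1.2.2 hdu
      simp only [List.length_append, List.length_cons, List.length_nil]
      omega
    · exact ih d

lemma g1fold_invA (l : List Int) (du1 : Int) (d : Array Int) (h : invA d) (hdu : -1 ≤ du1) :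
    invA (l.foldl (g1Visit du1) (d, [])).1 := by
  induction l generalizing d with
  | nil => exact h
  | cons v t ih =>
    simp only [List.foldl_cons, g1Visit]
    split_ifs with h1
    · rw [g1fold_acc]
      exact ih _ (invA_set _ _ _ h hdu)
    · exact ih d h

lemma g1fold_new (l : List Int) (du1 : Int) (d : Array Int) (hdu : du1 ≠ -1) :
    ∀ v ∈ (l.foldl (g1Visit du1) (d, [])).2,
      0 ≤ v ∧ v ≤ 100000 ∧ (l.foldl (g1Visit du1) (d, [])).1.getD v.toNat 0 ≠ -1 := by
  induction l generalizing d with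
  | nil => simp
  | cons w t ih =>
    intro v hv
    simp only [List.foldl_cons, g1Visit]
    simp only [List.foldl_cons, g1Visit] at hv
    split_ifs at hv ⊢ with h1
    · rw [g1fold_acc] at hv ⊢
      rcases List.mem_append.mp hv with hv | hv
      · rw [List.nil_append, List.mem_singleton] at hv; subst hv
        refine ⟨h1.1, h1.2.1, ?_⟩
        have hlt : v.toNat < d.size := getD_neg_lt _ _ h1.2.2
        have : (d.setIfInBounds v.toNat du1).getD v.toNat 0 = du1 :=
          getD_set_self _ _ _ (by simpa using hlt)
        rw [g1fold_mono _ _ _ _ (by rw [this]; exact hdu)]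
        rw [this]; exact hdu
      · exact ih _ v hv
    · exact ih d v hv

-- ghost1 monotonicity: a set dist entry is never changed again
lemma ghost1_mono (f : Nat) (pend : List Int) (d : Array Int) (i : Nat)
    (h : d.getD i 0 ≠ -1) :
    (ghost1 f pend d).1.getD i 0 = d.getD i 0 := by
  induction f generalizing pend d with
  | zero => rfl
  | succ f ih =>
    cases pend with
    | nil => rfl
    | cons u rest =>
      show (ghost1 f (rest ++ (step1 u d).2) (step1 u d).1).1.getD i 0 = d.getD i 0
      have hm : (step1 u d).1.getD i 0 = d.getD i 0 := g1fold_mono _ _ _ _ h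
      rw [ih _ _ (by rw [hm]; exact h), hm]

-- A port = ghost A (queue array + cursor vs list queue)
lemma gAfold_acc (l : List Int) (u : Int) (acc : List Int) (d c : Array Int) :
    l.foldl (gAVisit u) (d, c, acc)
      = ((l.foldl (gAVisit u) (d, c, [])).1, (l.foldl (gAVisit u) (d, c, [])).2.1,
          acc ++ (l.foldl (gAVisit u) (d, c, [])).2.2) := by
  induction l generalizing d c acc with
  | nil => simp
  | cons v t ih =>
    simp only [List.foldl_cons, gAVisit]
    split_ifs with h1 h2 h3
    · exact ih (acc := acc) _ _
    · simp only [List.nil_append]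
      rw [ih (acc := acc ++ [v]), ih (acc := [v])]; simp
    · exact ih (acc := acc) _ _
    · exact ih (acc := acc) _ _

lemma stepA_list (l : List Int) (u : Int) (q : Array Int) (d c : Array Int) :
    l.foldl (bfsVisit u) (q, d, c)
      = ((l.foldl (gAVisit u) (d, c, [])).2.2.foldl Array.push q,
          (l.foldl (gAVisit u) (d, c, [])).1, (l.foldl (gAVisit u) (d, c, [])).2.1) := by
  induction l generalizing q d c with
  | nil => simp
  | cons v t ih =>
    simp only [List.foldl_cons, bfsVisit, gAVisit]
    split_ifs with h1 h2 h3
    · exact ih _ _ _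
    · simp only [List.nil_append]
      rw [ih, gAfold_acc (acc := [v])]
      simp
    · exact ih _ _ _
    · exact ih _ _ _

lemma loopA_eq_ghost (f : Nat) (q : Array Int) (qi : Nat) (d c : Array Int) :
    bfsLoop f q qi d c = ghostA f (q.toList.drop qi) d c := by
  induction f generalizing q qi d c with
  | zero => rfl
  | succ f ih =>
    rw [bfsLoop]
    by_cases h : qi < q.size
    · rw [dif_pos h]
      have hlen : qi < q.toList.length := by simpa using h
      rw [List.drop_eq_getElem_cons hlen]
      have hq : q.toList[qi] = q[qi] := by simp
      rw [hq, ghostA, stepA_list, ih]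
      have : ((([q[qi] + 1, q[qi] - 1, q[qi] * 2].foldl (gAVisit q[qi]) (d, c, [])).2.2.foldl
            Array.push q).toList.drop (qi + 1))
          = q.toList.drop (qi + 1) ++ ([q[qi] + 1, q[qi] - 1, q[qi] * 2].foldl (gAVisit q[qi]) (d, c, [])).2.2 := by
        rw [pushAll_toList, List.drop_append_of_le_length (by simpa using h)]
      rw [this]
    · rw [dif_neg h]
      rw [List.drop_eq_nil_of_le (by simp; omega)]
      rfl

lemma stepB1_list (l : List Int) (du1 : Int) (q : Array Int) (d : Array Int) :
    l.foldl (altP1Visit du1) (q, d)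
      = ((l.foldl (g1Visit du1) (d, [])).2.foldl Array.push q,
          (l.foldl (g1Visit du1) (d, [])).1) := by
  induction l generalizing q d with
  | nil => simp
  | cons v t ih =>
    simp only [List.foldl_cons, altP1Visit, g1Visit]
    split_ifs with h1
    · simp only [List.nil_append]
      rw [ih, g1fold_acc (acc := [v])]
      simp
    · exact ih _ _

-- B phase-1 port = ghost1 (given enough fuel): final order = processed prefix ++ ghost order
lemma loopB1_eq_ghost (f : Nat) (q : Array Int) (head : Nat) (d : Array Int)
    (hinv : invA d) (hfuel : (q.toList.drop head).length + phi d ≤ f) :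
    (altP1Loop f q head d).1.toList
        = q.toList.take head ++ (ghost1 f (q.toList.drop head) d).2
      ∧ (altP1Loop f q head d).2 = (ghost1 f (q.toList.drop head) d).1 := by
  induction f generalizing q head d with
  | zero =>
    have hle : q.toList.length ≤ head := by
      have := hfuel
      rcases Nat.le_total q.toList.length head with h | h
      · exact h
      · have : (q.toList.drop head).length = q.toList.length - head := List.length_drop
        omega
    simp [altP1Loop, ghost1, List.take_of_length_le hle, List.drop_eq_nil_of_le hle]
  | succ f ih =>
    rw [altP1Loop]
    by_cases h : head < q.size
    · rw [dif_pos h]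
      have hlen : head < q.toList.length := by simpa using h
      rw [List.drop_eq_getElem_cons hlen]
      have hq : q.toList[head] = q[head] := by simp
      rw [hq, ghost1]
      have hstep : [q[head] + 1, q[head] - 1, q[head] * 2].foldl
            (altP1Visit (d.getD (pyIdx q[head]) 0 + 1)) (q, d)
          = ((step1 q[head] d).2.foldl Array.push q, (step1 q[head] d).1) :=
        stepB1_list _ _ _ _
      rw [hstep]
      have hdu : d.getD (pyIdx q[head]) 0 + 1 ≠ -1 := by
        have := invA_getD d (pyIdx q[head]) hinv; omega
      have hphi : phi (step1 q[head] d).1 + (step1 q[head] d).2.length = phi d :=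
        g1fold_phi _ _ _ hdu
      have hqd : ((step1 q[head] d).2.foldl Array.push q).toList
          = q.toList ++ (step1 q[head] d).2 := pushAll_toList _ _
      have hdropq : (q.toList ++ (step1 q[head] d).2).drop (head+1)
          = q.toList.drop (head+1) ++ (step1 q[head] d).2 :=
        List.drop_append_of_le_length (by omega)
      have htakeq : (q.toList ++ (step1 q[head] d).2).take (head+1)
          = q.toList.take head ++ [q.toList[head]] := by
        rw [List.take_append_of_le_length (by omega), List.take_add_one,
          List.getElem?_eq_getElem hlen]
        rfl
      have hfuel' : (((step1 q[head] d).2.foldl Array.push q).toList.drop (head+1)).length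
            + phi (step1 q[head] d).1 ≤ f := by
        rw [hqd, hdropq]
        have h1 : (q.toList.drop head).length = q.toList.length - head := List.length_drop
        have h2 : (q.toList.drop (head+1)).length = q.toList.length - (head+1) := List.length_drop
        simp only [List.length_append]
        omega
      have hinv' : invA (step1 q[head] d).1 := g1fold_invA _ _ _ hinv
        (by have := invA_getD d (pyIdx q[head]) hinv; omega)
      obtain ⟨ih1, ih2⟩ := ih _ (head+1) _ hinv' hfuel'
      rw [hqd] at ih1 ih2
      rw [hdropq] at ih1 ih2
      constructor
      · rw [ih1, htakeq, hq]
        simp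
      · rw [ih2]
    · rw [dif_neg h]
      have hle : q.toList.length ≤ head := by simpa using h
      rw [List.drop_eq_nil_of_le hle]
      cases f <;>
        simp [altP1Loop, ghost1, List.take_of_length_le hle]

lemma pyIdx_le (u : Int) (h1 : -100001 ≤ u) (h2 : u ≤ 100000) : pyIdx u ≤ 100000 := by
  unfold pyIdx; split_ifs <;> omega

lemma pyIdx_nonneg (v : Int) (h : 0 ≤ v) : pyIdx v = v.toNat := by
  unfold pyIdx; split_ifs <;> omega

lemma getD_ne_zero_lt (a : Array Int) (i : Nat) (h : a.getD i 0 ≠ 0) : i < a.size := by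
  by_contra hn
  simp [Array.getD_eq_getD_getElem?, Array.getElem?_eq_none (by omega : a.size ≤ i)] at h

lemma g1fold_mono' (l : List Int) (du1 : Int) (d : Array Int) (acc : List Int) (i : Nat)
    (h : d.getD i 0 ≠ -1) :
    (l.foldl (g1Visit du1) (d, acc)).1.getD i 0 = d.getD i 0 := by
  rw [g1fold_acc]
  exact g1fold_mono l du1 d i h

-- the generic per-target commutation with all carried invariants
lemma keygen (u du1 cu : Int) (dF : Array Int)
    (hu : -100001 ≤ u ∧ u ≤ 100000) (hdu : 1 ≤ du1) (hcu : 1 ≤ cu)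
    (hdF : dF.getD (pyIdx u) 0 = du1 - 1) :
    ∀ (l : List Int) (d c : Array Int) (new : List Int),
    invA d → Inv2 d c →
    d.getD (pyIdx u) 0 = du1 - 1 → c.getD (pyIdx u) 0 = cu →
    (∀ i : Nat, i ≤ 100000 → (l.foldl (g1Visit du1) (d, new)).1.getD i 0 ≠ -1 →
        dF.getD i 0 = (l.foldl (g1Visit du1) (d, new)).1.getD i 0) →
    l.foldl (gAVisit u) (d, c, new)
        = ((l.foldl (g1Visit du1) (d, new)).1, l.foldl (altP2Visit du1 cu dF) c,
            (l.foldl (g1Visit du1) (d, new)).2)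
      ∧ Inv2 (l.foldl (g1Visit du1) (d, new)).1 (l.foldl (altP2Visit du1 cu dF) c) := by
  intro l
  induction l with
  | nil =>
    intro d c new hA h2 h1 hc hext
    exact ⟨rfl, h2⟩
  | cons v t ih =>
    intro d c new hA h2 h1 hc hext
    simp only [List.foldl_cons]
    by_cases hb : 0 ≤ v ∧ v ≤ 100000
    · obtain ⟨hb0, hb1⟩ := hb
      have hvle : v.toNat ≤ 100000 := by omega
      by_cases hvp : v.toNat = pyIdx u
      · -- target is u's own cell: all three steps are no-ops
        have hdv : d.getD v.toNat 0 = du1 - 1 := by rw [hvp, h1]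
        have hne : d.getD v.toNat 0 ≠ -1 := by omega
        have e1 : gAVisit u (d, c, new) v = (d, c, new) := by
          simp only [gAVisit]
          rw [if_neg (by omega : ¬ (v < 0 ∨ v > 100000)), if_neg hne,
            if_neg (by rw [hdv, h1]; omega)]
        have e2 : g1Visit du1 (d, new) v = (d, new) := by
          simp only [g1Visit]
          rw [if_neg (fun h => hne h.2.2)]
        have e3 : altP2Visit du1 cu dF c v = c := by
          simp only [altP2Visit]
          rw [if_neg (by rintro ⟨-, -, hx⟩; rw [hvp, hdF] at hx; omega)]
        simp only [List.foldl_cons, e2] at hext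
        rw [e1, e2, e3]
        exact ih d c new hA h2 h1 hc hext
      · by_cases hdisc : d.getD v.toNat 0 = -1
        · -- discovery: both write dist, A writes count, phase-2 first-writes count
          have hdlt : v.toNat < d.size := getD_neg_lt _ _ hdisc
          have e1 : gAVisit u (d, c, new) v
              = (d.setIfInBounds v.toNat du1, c.setIfInBounds v.toNat cu, new ++ [v]) := by
            simp only [gAVisit]
            rw [if_neg (by omega : ¬ (v < 0 ∨ v > 100000)), if_pos hdisc, h1, hc]
            norm_num
          have e2 : g1Visit du1 (d, new) v
              = (d.setIfInBounds v.toNat du1, new ++ [v]) := by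
            simp only [g1Visit]
            rw [if_pos ⟨hb0, hb1, hdisc⟩]
          have hset : (d.setIfInBounds v.toNat du1).getD v.toNat 0 = du1 :=
            getD_set_self _ _ _ hdlt
          simp only [List.foldl_cons, e2] at hext
          have hdFv : dF.getD v.toNat 0 = du1 := by
            have hm : (t.foldl (g1Visit du1) (d.setIfInBounds v.toNat du1, new ++ [v])).1.getD
                v.toNat 0 = du1 := by
              rw [g1fold_mono' _ _ _ _ _ (by rw [hset]; omega), hset]
            rw [hext v.toNat hvle (by rw [hm]; omega), hm]
          have hcv : c.getD v.toNat 0 = -1 := by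
            rcases h2 v.toNat hvle with ⟨_, hx⟩ | ⟨hx, _⟩
            · exact hx
            · exact absurd hdisc hx
          have e3 : altP2Visit du1 cu dF c v = c.setIfInBounds v.toNat cu := by
            simp only [altP2Visit]
            rw [if_pos ⟨hb0, hb1, hdFv⟩, hcv, if_pos rfl]
          rw [e1, e2, e3]
          have hclt : v.toNat < c.size := getD_neg_lt _ _ hcv
          refine ih _ _ _ (invA_set _ _ _ hA (by omega)) ?_ ?_ ?_ hext
          · intro i hi
            by_cases hiv : i = v.toNat
            · subst hiv
              right
              rw [getD_set_self _ _ _ hdlt, getD_set_self _ _ _ hclt]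
              omega
            · rw [getD_set_ne _ _ _ _ (fun h => hiv h.symm),
                getD_set_ne _ _ _ _ (fun h => hiv h.symm)]
              exact h2 i hi
          · rw [getD_set_ne _ _ _ _ hvp]; exact h1
          · rw [getD_set_ne _ _ _ _ hvp]; exact hc
        · -- already discovered
          have hdFv : dF.getD v.toNat 0 = d.getD v.toNat 0 := by
            have e2 : g1Visit du1 (d, new) v = (d, new) := by
              simp only [g1Visit]
              rw [if_neg (fun h => hdisc h.2.2)]
            have hm : ((v :: t).foldl (g1Visit du1) (d, new)).1.getD v.toNat 0
                = d.getD v.toNat 0 := by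
              simp only [List.foldl_cons, e2]
              exact g1fold_mono' _ _ _ _ _ hdisc
            rw [hext v.toNat hvle (by rw [hm]; exact hdisc), hm]
          have e2 : g1Visit du1 (d, new) v = (d, new) := by
            simp only [g1Visit]
            rw [if_neg (fun h => hdisc h.2.2)]
          simp only [List.foldl_cons, e2] at hext
          have hcv1 : 1 ≤ c.getD v.toNat 0 := by
            rcases h2 v.toNat hvle with ⟨hx, _⟩ | ⟨_, hx⟩
            · exact absurd hx hdisc
            · exact hx
          by_cases hadd : d.getD v.toNat 0 = du1
          · -- same-layer edge: both add cu to count[v]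
            have e1 : gAVisit u (d, c, new) v
                = (d, c.setIfInBounds v.toNat (c.getD v.toNat 0 + cu), new) := by
              simp only [gAVisit]
              rw [if_neg (by omega : ¬ (v < 0 ∨ v > 100000)), if_neg hdisc,
                if_pos (by rw [hadd, h1]; omega), hc]
            have e3 : altP2Visit du1 cu dF c v
                = c.setIfInBounds v.toNat (c.getD v.toNat 0 + cu) := by
              simp only [altP2Visit]
              rw [if_pos ⟨hb0, hb1, by rw [hdFv]; exact hadd⟩, if_neg (by omega)]
            rw [e1, e2, e3]
            have hclt : v.toNat < c.size := getD_ne_zero_lt _ _ (by omega)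
            refine ih _ _ _ hA ?_ h1 ?_ hext
            · intro i hi
              by_cases hiv : i = v.toNat
              · subst hiv
                right
                rw [getD_set_self _ _ _ hclt]
                exact ⟨hdisc, by omega⟩
              · rw [getD_set_ne _ _ _ _ (fun h => hiv h.symm)]
                exact h2 i hi
            · rw [getD_set_ne _ _ _ _ hvp]; exact hc
          · -- other-layer edge: all three skip
            have e1 : gAVisit u (d, c, new) v = (d, c, new) := by
              simp only [gAVisit]
              rw [if_neg (by omega : ¬ (v < 0 ∨ v > 100000)), if_neg hdisc,
                if_neg (by rw [h1]; omega)]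
            have e3 : altP2Visit du1 cu dF c v = c := by
              simp only [altP2Visit]
              rw [if_neg (by rintro ⟨-, -, hx⟩; rw [hdFv] at hx; exact hadd hx)]
            rw [e1, e2, e3]
            exact ih d c new hA h2 h1 hc hext
    · -- out of bounds: all three skip
      have e1 : gAVisit u (d, c, new) v = (d, c, new) := by
        simp only [gAVisit]
        rw [if_pos (by omega : (v < 0 ∨ v > 100000))]
      have e2 : g1Visit du1 (d, new) v = (d, new) := by
        simp only [g1Visit]
        rw [if_neg (fun h => hb ⟨h.1, h.2.1⟩)]
      have e3 : altP2Visit du1 cu dF c v = c := by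
        simp only [altP2Visit]
        rw [if_neg (fun h => hb ⟨h.1, h.2.1⟩)]
      simp only [List.foldl_cons, e2] at hext
      rw [e1, e2, e3]
      exact ih d c new hA h2 h1 hc hext

-- the per-node commutation: A's interleaved step = ghost1 dist step + phase-2 count step
-- (dF is any extension of the post-step dist table)
lemma stepAC (u : Int) (d c dF : Array Int)
    (hu : -100001 ≤ u ∧ u ≤ 100000)
    (hd : d.getD (pyIdx u) 0 ≠ -1)
    (hA : invA d) (h2 : Inv2 d c)
    (hext : ∀ i : Nat, i ≤ 100000 → (step1 u d).1.getD i 0 ≠ -1 →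
      dF.getD i 0 = (step1 u d).1.getD i 0) :
    [u + 1, u - 1, u * 2].foldl (gAVisit u) (d, c, [])
        = ((step1 u d).1, altP2Step dF c u, (step1 u d).2)
      ∧ Inv2 (step1 u d).1 (altP2Step dF c u) := by
  have hpu : pyIdx u ≤ 100000 := pyIdx_le u hu.1 hu.2
  have hge : 0 ≤ d.getD (pyIdx u) 0 := by
    have := invA_getD d (pyIdx u) hA; omega
  have hcu : 1 ≤ c.getD (pyIdx u) 0 := by
    rcases h2 (pyIdx u) hpu with ⟨hx, _⟩ | ⟨_, hx⟩
    · exact absurd hx hd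
    · exact hx
  have hmono : (step1 u d).1.getD (pyIdx u) 0 = d.getD (pyIdx u) 0 :=
    g1fold_mono _ _ _ _ hd
  have hdF : dF.getD (pyIdx u) 0 = d.getD (pyIdx u) 0 := by
    rw [hext (pyIdx u) hpu (by rw [hmono]; exact hd), hmono]
  have hstep : altP2Step dF c u
      = [u + 1, u - 1, u * 2].foldl
          (altP2Visit (d.getD (pyIdx u) 0 + 1) (c.getD (pyIdx u) 0) dF) c := by
    unfold altP2Step
    rw [hdF]
  rw [hstep]
  exact keygen u (d.getD (pyIdx u) 0 + 1) (c.getD (pyIdx u) 0) dF hu (by omega) hcu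
    (by omega) [u + 1, u - 1, u * 2] d c [] hA h2 (by omega) rfl hext

-- the main staging lemma: A's interleaved ghost = ghost1 then the phase-2 fold
lemma ghostA_staged (f : Nat) (pend : List Int) (d c : Array Int)
    (hA : invA d) (h2 : Inv2 d c) (hp : PendOK pend d) :
    ghostA f pend d c
      = ((ghost1 f pend d).1, (ghost1 f pend d).2.foldl (altP2Step (ghost1 f pend d).1) c) := by
  induction f generalizing pend d c with
  | zero => rfl
  | succ f ih =>
    cases pend with
    | nil => rfl
    | cons u rest =>
      obtain ⟨hu1, hu2, hd⟩ := hp u (List.mem_cons_self ..)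
      have hgr : ghost1 (f+1) (u :: rest) d
          = ((ghost1 f (rest ++ (step1 u d).2) (step1 u d).1).1,
              u :: (ghost1 f (rest ++ (step1 u d).2) (step1 u d).1).2) := rfl
      have hdu : 0 ≤ d.getD (pyIdx u) 0 := by
        have := invA_getD d (pyIdx u) hA; omega
      have hext : ∀ i : Nat, i ≤ 100000 → (step1 u d).1.getD i 0 ≠ -1 →
          (ghost1 f (rest ++ (step1 u d).2) (step1 u d).1).1.getD i 0
            = (step1 u d).1.getD i 0 := by
        intro i _ hi
        exact ghost1_mono _ _ _ _ hi
      obtain ⟨hfold, hinv2'⟩ := stepAC u d c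
        (ghost1 f (rest ++ (step1 u d).2) (step1 u d).1).1 ⟨hu1, hu2⟩ hd hA h2
        (fun i hi hne => hext i hi hne)
      have hA' : invA (step1 u d).1 := g1fold_invA _ _ _ hA (by omega)
      have hp' : PendOK (rest ++ (step1 u d).2) (step1 u d).1 := by
        intro v hv
        rcases List.mem_append.mp hv with hv | hv
        · obtain ⟨hv1, hv2, hv3⟩ := hp v (List.mem_cons_of_mem _ hv)
          have hm : (step1 u d).1.getD (pyIdx v) 0 = d.getD (pyIdx v) 0 :=
            g1fold_mono _ _ _ _ hv3
          exact ⟨hv1, hv2, by rw [hm]; exact hv3⟩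
        · obtain ⟨hv1, hv2, hv3⟩ := g1fold_new _ _ _ (by omega) v hv
          refine ⟨by omega, hv2, ?_⟩
          rw [pyIdx_nonneg v hv1]
          exact hv3
      show ghostA (f+1) (u :: rest) d c = _
      rw [ghostA]
      simp only [hfold]
      rw [ih _ _ _ hA' hinv2' hp', hgr]
      simp [List.foldl_cons]

lemma init_invA (n : Int) :
    invA ((Array.replicate 100001 (-1 : Int)).setIfInBounds (pyIdx n) 0) := by
  intro x hx
  rw [Array.toList_setIfInBounds, Array.toList_replicate] at hx
  rcases List.mem_or_eq_of_mem_set hx with hx' | rfl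
  · rw [List.eq_of_mem_replicate hx']
  · norm_num

lemma init_phi (n : Int) :
    phi ((Array.replicate 100001 (-1 : Int)).setIfInBounds (pyIdx n) 0) ≤ 100001 := by
  unfold phi
  calc ((Array.replicate 100001 (-1 : Int)).setIfInBounds (pyIdx n) 0).toList.countP (· = -1)
      ≤ ((Array.replicate 100001 (-1 : Int)).setIfInBounds (pyIdx n) 0).toList.length :=
        List.countP_le_length
    _ = 100001 := by
        rw [Array.toList_setIfInBounds, List.length_set, Array.toList_replicate,
          List.length_replicate]

lemma init_Inv2 (n : Int) (h : pyIdx n ≤ 100000) :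
    Inv2 ((Array.replicate 100001 (-1 : Int)).setIfInBounds (pyIdx n) 0)
      ((Array.replicate 100001 (-1 : Int)).setIfInBounds (pyIdx n) 1) := by
  intro i hi
  have hsz : (Array.replicate 100001 (-1 : Int)).size = 100001 := by simp
  by_cases hin : i = pyIdx n
  · subst hin
    right
    rw [getD_set_self _ _ _ (by omega), getD_set_self _ _ _ (by omega)]
    omega
  · left
    rw [getD_set_ne _ _ _ _ (fun hx => hin hx.symm), getD_set_ne _ _ _ _ (fun hx => hin hx.symm)]
    have hlt : i < 100001 := by omega
    have hrep : (Array.replicate 100001 (-1 : Int)).getD i 0 = -1 := by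
      simp [Array.getD_eq_getD_getElem?, Array.getElem?_replicate, hlt]
    exact ⟨hrep, hrep⟩

-- ===== VERDICT (by name: the statement is the Claim_ definition above) =====
theorem bfs_spec : Claim_equal_bfs := by
  intro n k _ hpre
  obtain ⟨hn1, hn2, hk1, hk2⟩ := hpre
  unfold Spec_bfs bfs bfs_alt
  have hpn : pyIdx n ≤ 100000 := pyIdx_le n hn1 hn2
  have hA0 := init_invA n
  have h20 := init_Inv2 n hpn
  have hsz : (Array.replicate 100001 (-1 : Int)).size = 100001 := by simp
  have hp0 : PendOK [n] ((Array.replicate 100001 (-1 : Int)).setIfInBounds (pyIdx n) 0) := by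
    intro u hu
    rw [List.mem_singleton] at hu
    subst hu
    refine ⟨hn1, hn2, ?_⟩
    rw [getD_set_self _ _ _ (by omega)]
    omega
  have htl : (#[n] : Array Int).toList = [n] := rfl
  have hfuel : ((#[n] : Array Int).toList.drop 0).length
      + phi ((Array.replicate 100001 (-1 : Int)).setIfInBounds (pyIdx n) 0) ≤ 200004 := by
    have := init_phi n
    simp only [htl, List.drop_zero, List.length_cons, List.length_nil]
    omega
  obtain ⟨hb1, hb2⟩ := loopB1_eq_ghost 200004 #[n] 0
    ((Array.replicate 100001 (-1 : Int)).setIfInBounds (pyIdx n) 0) hA0 hfuel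
  rw [htl, List.drop_zero] at hb1 hb2
  rw [List.take_zero, List.nil_append] at hb1
  have hA : bfsLoop 200004 #[n] 0
        ((Array.replicate 100001 (-1 : Int)).setIfInBounds (pyIdx n) 0)
        ((Array.replicate 100001 (-1 : Int)).setIfInBounds (pyIdx n) 1)
      = ((ghost1 200004 [n] ((Array.replicate 100001 (-1 : Int)).setIfInBounds (pyIdx n) 0)).1,
          (ghost1 200004 [n] ((Array.replicate 100001 (-1 : Int)).setIfInBounds (pyIdx n) 0)).2.foldl
            (altP2Step (ghost1 200004 [n]
              ((Array.replicate 100001 (-1 : Int)).setIfInBounds (pyIdx n) 0)).1)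
            ((Array.replicate 100001 (-1 : Int)).setIfInBounds (pyIdx n) 1)) := by
    rw [loopA_eq_ghost, htl, List.drop_zero]
    exact ghostA_staged 200004 [n] _ _ hA0 h20 hp0
  simp only [hA, hb2]
  rw [← Array.foldl_toList, hb1]
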